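-- pv_equiv track=rewrite | github.com/ZhaoxiangD/Predict-analysis-FL-LTR-RTs | hmmstep_test.py | domdict_process
-- ===== SOURCE A (Python) =====
-- def domdict_process(domdict):
--     selected_domdict = []
--     for family in range(len(domdict)):
--         selected_domdict.append(domdict[family][0])
--         for i in range(1,len(domdict[family])):
--             if domdict[family][i]['domID'] != domdict[family][i-1]['domID']:
--                 domdict[family][i]['unclass'] = 'False'
--                 selected_domdict.append(domdict[family][i])
--     return selected_domdict
-- ===== SOURCE B (Python) =====
-- def _select(family):
--     # Group the family into maximal runs of equal domID, then keep one
--     # representative per run: the very first element as-is, and the first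
--     # element of every later run marked with unclass = 'False'.
--     runs = []
--     for d in family:
--         if not runs or runs[-1][0]['domID'] != d['domID']:
--             runs.append([d])
--         else:
--             runs[-1].append(d)
--     head = runs[0][0]
--     rest = []
--     for run in runs[1:]:
--         run[0]['unclass'] = 'False'
--         rest.append(run[0])
--     return [head] + rest
--
-- def domdict_process(domdict):
--     return [d for family in domdict for d in _select(family)]
-- ===== Notes on version B (the rewrite author's own statement) =====
-- stated objective: alternative
-- what changed: Replaces A's index-based compare-to-previous scan with a group-then-representative pass: each family is first split into maximal runs of equal domID, then the first run's head is kept as-is and the head of every later run is marked unclass='False'; the result is one flat comprehension over families.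
import Mathlib
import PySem

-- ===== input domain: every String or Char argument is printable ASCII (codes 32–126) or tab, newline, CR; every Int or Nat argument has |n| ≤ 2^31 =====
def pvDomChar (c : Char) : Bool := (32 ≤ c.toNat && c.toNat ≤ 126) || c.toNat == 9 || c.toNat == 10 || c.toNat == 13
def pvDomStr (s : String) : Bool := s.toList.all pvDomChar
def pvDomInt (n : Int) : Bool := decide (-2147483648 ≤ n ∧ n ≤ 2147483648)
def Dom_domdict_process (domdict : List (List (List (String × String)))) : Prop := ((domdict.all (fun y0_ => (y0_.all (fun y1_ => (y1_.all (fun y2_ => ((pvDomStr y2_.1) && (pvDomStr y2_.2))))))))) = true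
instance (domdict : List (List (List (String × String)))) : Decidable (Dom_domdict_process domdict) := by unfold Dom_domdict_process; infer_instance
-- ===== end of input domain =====

-- B groups each family into runs of equal domID and keeps one representative per run,
-- instead of A's index-based compare-to-previous scan; return values are proved equal.
-- Both Pythons mutate the kept run-start dicts in place (setting 'unclass'); the theorems
-- here are about the RETURN value.

-- ===== PORT A =====
def domdict_process (domdict : List (List (List (String × String)))) : List (List (String × String)) :=
  domdict.foldl (fun sel fam =>
    let sel := sel ++ [((PySem.List.pyGet? fam 0).getD [])]
    let st := (PySem.List.pyRange 1 (fam.length : Int) 1).foldl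
      (fun (st : List (List (String × String)) × List (List (String × String))) i =>
        let di := (PySem.List.pyGet? st.1 i).getD []
        let dp := (PySem.List.pyGet? st.1 (i - 1)).getD []
        if (PySem.Dict.mk di).get? "domID" ≠ (PySem.Dict.mk dp).get? "domID" then
          let di' := ((PySem.Dict.mk di).insert "unclass" "False").items
          (st.1.set i.toNat di', st.2 ++ [di'])
        else st) (fam, sel)
    st.2) []

-- ===== PORT B =====
-- one step of B's run-building loop over a family
def pvRunsStep (runs : List (List (List (String × String)))) (d : List (String × String)) :
    List (List (List (String × String))) :=
  if runs = [] ∨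
      (PySem.Dict.mk ((PySem.List.pyGet? ((PySem.List.pyGet? runs (-1)).getD []) 0).getD [])).get? "domID"
        ≠ (PySem.Dict.mk d).get? "domID" then
    runs ++ [[d]]
  else
    runs.dropLast ++ [((PySem.List.pyGet? runs (-1)).getD []) ++ [d]]

-- B's _select helper
def pvSelect (family : List (List (String × String))) : List (List (String × String)) :=
  let runs := family.foldl pvRunsStep []
  let head := (PySem.List.pyGet? ((PySem.List.pyGet? runs 0).getD []) 0).getD []
  let rest := (PySem.List.slice runs (some 1) none).foldl
    (fun acc run =>
      acc ++ [((PySem.Dict.mk ((PySem.List.pyGet? run 0).getD [])).insert "unclass" "False").items]) []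
  [head] ++ rest

def domdict_process_alt (domdict : List (List (List (String × String)))) : List (List (String × String)) :=
  domdict.flatMap pvSelect

-- ===== PRECONDITION & SPEC =====
-- Pre_ excludes exactly the inputs where Python A raises: an empty family (IndexError at
-- family[0]) or a family of length ≥ 2 containing an element without a 'domID' key (KeyError).
def Pre_domdict_process (domdict : List (List (List (String × String)))) : Prop :=
  ∀ fam ∈ domdict, fam ≠ [] ∧ (2 ≤ fam.length → ∀ d ∈ fam, d.any (fun p => p.1 == "domID"))

instance (domdict : List (List (List (String × String)))) : Decidable (Pre_domdict_process domdict) := by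
  unfold Pre_domdict_process; infer_instance

def pvWitness_domdict_process : (List (List (List (String × String)))) :=
  [[[("domID", "a"), ("unclass", "True")]],
   [[("domID", "a")], [("domID", "b"), ("x", "1")], [("domID", "b")]]]

def Spec_domdict_process (domdict : List (List (List (String × String)))) (out : List (List (String × String))) : Prop := out = domdict_process_alt domdict
instance (domdict : List (List (List (String × String)))) (out : List (List (String × String))) : Decidable (Spec_domdict_process domdict out) := by unfold Spec_domdict_process; infer_instance

-- ===== CLAIM (what is proved, stated in full; the proofs are below) =====
def Claim_equal_domdict_process : Prop := ∀ (domdict : List (List (List (String × String)))), Dom_domdict_process domdict → Pre_domdict_process domdict → Spec_domdict_process domdict (domdict_process domdict)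

-- ===== LEMMAS AND PROOFS =====

-- proof-only helpers: the id of a dict, marking a dict, and the common "one per run" core
def pvGetID (d : List (String × String)) : Option String := (PySem.Dict.mk d).get? "domID"
def pvMark (d : List (String × String)) : List (String × String) :=
  ((PySem.Dict.mk d).insert "unclass" "False").items

def pvCore (k : Option String) : List (List (String × String)) → List (List (String × String))
  | [] => []
  | d :: t => if pvGetID d ≠ k then pvMark d :: pvCore (pvGetID d) t else pvCore k t

-- a recursive description of B's run-building fold
def pvBuild (r : List (List (String × String))) :
    List (List (String × String)) → List (List (List (String × String)))
  | [] => [r]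
  | d :: t => if pvGetID (r.headD []) ≠ pvGetID d then r :: pvBuild [d] t else pvBuild (r ++ [d]) t

theorem pvB_fold (t : List (List (String × String))) :
    ∀ (runs0 : List (List (List (String × String)))) (r : List (List (String × String))),
      r ≠ [] → t.foldl pvRunsStep (runs0 ++ [r]) = runs0 ++ pvBuild r t := by
  induction t with
  | nil => intro runs0 r hr; simp [pvBuild]
  | cons d t ih =>
    intro runs0 r hr
    have hstep : pvRunsStep (runs0 ++ [r]) d =
        if pvGetID (r.headD []) ≠ pvGetID d then (runs0 ++ [r]) ++ [[d]] else runs0 ++ [r ++ [d]] := by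
      simp [pvRunsStep, pvGetID, PySem.List.pyGet?_neg_one_append_singleton, PySem.List.pyGet?_zero]
      rcases r with _ | ⟨h, r'⟩
      · exact absurd rfl hr
      · simp
    simp only [List.foldl_cons, hstep, pvBuild]
    by_cases hne : pvGetID (r.headD []) ≠ pvGetID d
    · simp only [if_pos hne]
      rw [ih (runs0 ++ [r]) [d] (by simp)]
      simp
    · simp only [if_neg hne]
      rw [ih runs0 (r ++ [d]) (by simp)]

theorem pvGetID_mark (d : List (String × String)) : pvGetID (pvMark d) = pvGetID d := by
  show ((PySem.Dict.mk d).insert "unclass" "False").get? "domID" = (PySem.Dict.mk d).get? "domID"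
  rw [PySem.Dict.get?_insert_of_ne]; decide

theorem pvBuild_map (t : List (List (String × String))) :
    ∀ (r : List (List (String × String))), r ≠ [] →
      (pvBuild r t).map (fun run => pvMark (run.headD []))
        = pvMark (r.headD []) :: pvCore (pvGetID (r.headD [])) t := by
  induction t with
  | nil => intro r hr; simp [pvBuild, pvCore]
  | cons d t ih =>
    rintro (_ | ⟨x, r'⟩) hr
    · exact absurd rfl hr
    simp only [pvBuild, pvCore, List.headD_cons]
    by_cases hne : pvGetID x ≠ pvGetID d
    · have hne' : pvGetID d ≠ pvGetID x := fun h => hne h.symm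
      rw [if_pos hne, if_pos hne', List.map_cons, ih [d] (by simp)]
      simp
    · have heq : pvGetID d = pvGetID x := by
        by_contra h; exact hne (fun h' => h h'.symm)
      rw [if_neg hne, if_neg (by simp [heq]), ih (x :: r' ++ [d]) (by simp)]
      simp

theorem pvBuild_head (t : List (List (String × String))) :
    ∀ (r : List (List (String × String))), r ≠ [] →
      ((pvBuild r t).headD []).headD [] = r.headD [] ∧ pvBuild r t ≠ [] := by
  induction t with
  | nil => intro r hr; simp [pvBuild]
  | cons d t ih =>
    rintro (_ | ⟨x, r'⟩) hr
    · exact absurd rfl hr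
    simp only [pvBuild, List.headD_cons]
    by_cases hne : pvGetID x ≠ pvGetID d
    · rw [if_pos hne]; simp
    · rw [if_neg hne]
      have := ih (x :: r' ++ [d]) (by simp)
      simpa using this

theorem pvSelect_eq (h : List (String × String)) (t : List (List (String × String))) :
    pvSelect (h :: t) = h :: pvCore (pvGetID h) t := by
  have hstart : List.foldl pvRunsStep [] (h :: t) = pvBuild [h] t := by
    have : pvRunsStep [] h = [] ++ [[h]] := by simp [pvRunsStep]
    simpa [this] using pvB_fold t [] [h] (by simp)
  have hhd := pvBuild_head t [h] (by simp)
  have hmap := pvBuild_map t [h] (by simp)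
  simp only [pvSelect, hstart, PySem.List.slice_from_one]
  have h1 : (PySem.List.pyGet? ((PySem.List.pyGet? (pvBuild [h] t) 0).getD []) 0).getD [] = h := by
    rcases hbl : pvBuild [h] t with _ | ⟨r0, rs⟩
    · exact absurd hbl hhd.2
    · rw [hbl] at hhd
      simp only [List.headD_cons] at hhd
      simp [PySem.List.pyGet?_zero]
      rcases r0 with _ | ⟨y, r0'⟩ <;> simp_all
  have h2 : List.foldl
        (fun acc run => acc ++ [((PySem.Dict.mk ((PySem.List.pyGet? run 0).getD [])).insert "unclass" "False").items]) []
        (pvBuild [h] t).tail = pvCore (pvGetID h) t := by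
    rw [PySem.List.foldl_append_singleton_eq_map]
    have hcg : (pvBuild [h] t).tail.map
        (fun run => ((PySem.Dict.mk ((PySem.List.pyGet? run 0).getD [])).insert "unclass" "False").items)
        = (pvBuild [h] t).tail.map (fun run => pvMark (run.headD [])) := by
      apply List.map_congr_left
      intro run _
      rcases run with _ | ⟨y, rr⟩ <;> simp [pvMark, PySem.List.pyGet?_zero]
    rw [hcg, List.map_tail, hmap]
    simp
  rw [h1, h2]
  rfl

theorem pvSet_append_length {α : Type} (pre : List α) (d x : α) (t : List α) :
    (pre ++ d :: t).set pre.length x = pre ++ x :: t := by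
  induction pre with
  | nil => rfl
  | cons a pre ih => simp [List.set_cons_succ, ih]

theorem pvA_loop (t : List (List (String × String))) :
    ∀ (pre : List (List (String × String))) (sel : List (List (String × String)))
      (hpre : pre ≠ []),
      ((PySem.List.pyRange (pre.length : Int) ((pre.length : Int) + (t.length : Int)) 1).foldl
        (fun (st : List (List (String × String)) × List (List (String × String))) i =>
          let di := (PySem.List.pyGet? st.1 i).getD []
          let dp := (PySem.List.pyGet? st.1 (i - 1)).getD []
          if (PySem.Dict.mk di).get? "domID" ≠ (PySem.Dict.mk dp).get? "domID" then
            let di' := ((PySem.Dict.mk di).insert "unclass" "False").items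
            (st.1.set i.toNat di', st.2 ++ [di'])
          else st) (pre ++ t, sel)).2
      = sel ++ pvCore (pvGetID (pre.getLast hpre)) t := by
  induction t with
  | nil =>
    intro pre sel hpre
    rw [PySem.List.pyRange_one_eq_nil (by simp)]
    simp [pvCore]
  | cons d t ih =>
    intro pre sel hpre
    have hlt : (pre.length : Int) < (pre.length : Int) + ((d :: t).length : Int) := by
      simp only [List.length_cons]
      push_cast
      omega
    rw [PySem.List.pyRange_one_cons hlt, List.foldl_cons]
    have hdi : (PySem.List.pyGet? (pre ++ d :: t) (pre.length : Int)).getD [] = d := by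
      rw [PySem.List.pyGet?_append_length]; rfl
    have hplen : 1 ≤ pre.length := by
      rcases pre with _ | _
      · exact absurd rfl hpre
      · simp
    have hdp : (PySem.List.pyGet? (pre ++ d :: t) ((pre.length : Int) - 1)).getD []
        = pre.getLast hpre := by
      have hcast : (pre.length : Int) - 1 = ((pre.length - 1 : Nat) : Int) := by push_cast [hplen]; ring
      rw [hcast, PySem.List.pyGet?_natCast, List.getElem?_append_left (by omega),
        ← List.getLast?_eq_getElem?, List.getLast?_eq_some_getLast hpre]
      rfl
    simp only [hdi, hdp]
    by_cases hne : (PySem.Dict.mk d).get? "domID" ≠ (PySem.Dict.mk (pre.getLast hpre)).get? "domID"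
    · rw [if_pos hne]
      have hset : (pre ++ d :: t).set (pre.length : Int).toNat (pvMark d) = (pre ++ [pvMark d]) ++ t := by
        simp only [Int.toNat_natCast, pvMark]
        rw [pvSet_append_length]
        simp
      have hlen' : ((pre ++ [pvMark d]).length : Int) = (pre.length : Int) + 1 := by simp
      have hrange : PySem.List.pyRange ((pre.length : Int) + 1) ((pre.length : Int) + ((d :: t).length : Int)) 1
          = PySem.List.pyRange ((pre ++ [pvMark d]).length : Int)
              (((pre ++ [pvMark d]).length : Int) + (t.length : Int)) 1 := by
        rw [hlen']; congr 1; simp; ring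
      have hIH := ih (pre ++ [pvMark d]) (sel ++ [pvMark d]) (by simp)
      rw [List.getLast_append_singleton] at hIH
      show ((PySem.List.pyRange ((pre.length : Int) + 1) ((pre.length : Int) + ((d :: t).length : Int)) 1).foldl
        _ ((pre ++ d :: t).set (pre.length : Int).toNat (pvMark d), sel ++ [pvMark d])).2 = _
      rw [hset, hrange, hIH, pvGetID_mark]
      have : pvGetID d ≠ pvGetID (pre.getLast hpre) := hne
      simp [pvCore, this]
    · rw [if_neg hne]
      have heq : pvGetID d = pvGetID (pre.getLast hpre) := by
        by_contra hc; exact hne hc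
      have hrange : PySem.List.pyRange ((pre.length : Int) + 1) ((pre.length : Int) + ((d :: t).length : Int)) 1
          = PySem.List.pyRange ((pre ++ [d]).length : Int)
              (((pre ++ [d]).length : Int) + (t.length : Int)) 1 := by
        simp; congr 1; ring
      have hIH := ih (pre ++ [d]) sel (by simp)
      rw [List.getLast_append_singleton] at hIH
      show ((PySem.List.pyRange ((pre.length : Int) + 1) ((pre.length : Int) + ((d :: t).length : Int)) 1).foldl
        _ (pre ++ d :: t, sel)).2 = _
      rw [show pre ++ d :: t = (pre ++ [d]) ++ t by simp, hrange, hIH]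
      simp [pvCore, heq]

theorem pvFam_eq (fam : List (List (String × String))) (sel : List (List (String × String))) :
    ((PySem.List.pyRange 1 (fam.length : Int) 1).foldl
        (fun (st : List (List (String × String)) × List (List (String × String))) i =>
          let di := (PySem.List.pyGet? st.1 i).getD []
          let dp := (PySem.List.pyGet? st.1 (i - 1)).getD []
          if (PySem.Dict.mk di).get? "domID" ≠ (PySem.Dict.mk dp).get? "domID" then
            let di' := ((PySem.Dict.mk di).insert "unclass" "False").items
            (st.1.set i.toNat di', st.2 ++ [di'])
          else st) (fam, sel ++ [((PySem.List.pyGet? fam 0).getD [])])).2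
    = sel ++ pvSelect fam := by
  rcases fam with _ | ⟨h, t⟩
  · rw [PySem.List.pyRange_one_eq_nil (by simp)]
    have : pvSelect [] = [[]] := by simp [pvSelect, PySem.List.slice_from_one, PySem.List.pyGet?, PySem.List.pyIdx?]
    simp [this, PySem.List.pyGet?, PySem.List.pyIdx?]
  · have hget : (PySem.List.pyGet? (h :: t) 0).getD [] = h := by
      simp
    have hcast : ((h :: t).length : Int) = (([h] : List (List (String × String))).length : Int) + (t.length : Int) := by
      simp only [List.length_cons, List.length_nil]
      push_cast
      ring
    have hA := pvA_loop t [h] (sel ++ [h]) (by simp)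
    rw [hget, hcast]
    show ((PySem.List.pyRange (([h] : List (List (String × String))).length : Int)
        ((([h] : List (List (String × String))).length : Int) + (t.length : Int)) 1).foldl
        _ (([h] : List (List (String × String))) ++ t, sel ++ [h])).2 = _
    rw [hA, pvSelect_eq]
    simp [List.getLast]

theorem pvMain (domdict : List (List (List (String × String)))) :
    ∀ (sel : List (List (String × String))),
      domdict.foldl (fun sel fam =>
        let sel := sel ++ [((PySem.List.pyGet? fam 0).getD [])]
        let st := (PySem.List.pyRange 1 (fam.length : Int) 1).foldl
          (fun (st : List (List (String × String)) × List (List (String × String))) i =>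
            let di := (PySem.List.pyGet? st.1 i).getD []
            let dp := (PySem.List.pyGet? st.1 (i - 1)).getD []
            if (PySem.Dict.mk di).get? "domID" ≠ (PySem.Dict.mk dp).get? "domID" then
              let di' := ((PySem.Dict.mk di).insert "unclass" "False").items
              (st.1.set i.toNat di', st.2 ++ [di'])
            else st) (fam, sel)
        st.2) sel = sel ++ domdict.flatMap pvSelect := by
  induction domdict with
  | nil => intro sel; simp
  | cons fam dd ih =>
    intro sel
    rw [List.foldl_cons]
    show (dd.foldl _ ((PySem.List.pyRange 1 (fam.length : Int) 1).foldl _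
        (fam, sel ++ [((PySem.List.pyGet? fam 0).getD [])])).2) = _
    rw [pvFam_eq fam sel, ih (sel ++ pvSelect fam)]
    simp

-- ===== VERDICT (by name: the statement is the Claim_ definition above) =====
theorem domdict_process_spec : Claim_equal_domdict_process := by
  intro domdict _ _
  show domdict_process domdict = domdict_process_alt domdict
  unfold domdict_process domdict_process_alt
  simpa using pvMain domdict []
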